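-- pv_equiv track=rewrite | github.com/ianpottinger/Python3 | moreadt.py | gen_all_sequences
-- ===== SOURCE A (Python) =====
-- def gen_all_sequences(outcomes, length = 3):
--     """
--     Iterative function that enumerates the set of all sequences of
--     outcomes of given length
--     """
--
--     answer = set([()])
--     for dummy_idx in range(length):
--         temp = set()
--         for seq in answer:
--             for item in outcomes:
--                 new_seq = list(seq)
--                 new_seq += [item]
--                 temp.add(tuple(new_seq))
--         answer = temp
--     return answer
-- ===== SOURCE B (Python) =====
-- def gen_all_sequences(outcomes, length=3):
--     """Recursive enumeration of all outcome sequences of the given length."""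
--     if length <= 0:
--         return {()}
--     return {seq + (item,)
--             for seq in gen_all_sequences(outcomes, length - 1)
--             for item in outcomes}
-- ===== Notes on version B (the rewrite author's own statement) =====
-- stated objective: simpler
-- what changed: Replaced the explicit accumulator loop with temp sets by a recursion on length that builds the result as a single set comprehension extending each shorter sequence.
import Mathlib
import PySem

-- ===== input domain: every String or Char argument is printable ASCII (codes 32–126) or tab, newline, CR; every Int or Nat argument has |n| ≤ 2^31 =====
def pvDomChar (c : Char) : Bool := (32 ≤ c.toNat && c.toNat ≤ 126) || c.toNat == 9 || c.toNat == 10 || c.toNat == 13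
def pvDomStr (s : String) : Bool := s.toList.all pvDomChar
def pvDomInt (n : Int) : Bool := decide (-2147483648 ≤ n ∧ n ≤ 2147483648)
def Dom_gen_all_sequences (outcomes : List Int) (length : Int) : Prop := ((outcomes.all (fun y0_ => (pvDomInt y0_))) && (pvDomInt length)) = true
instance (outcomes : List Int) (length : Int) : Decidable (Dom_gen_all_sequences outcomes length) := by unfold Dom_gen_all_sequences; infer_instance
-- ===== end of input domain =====

-- B replaces A's accumulator loop over range(length) by a recursion on length building the
-- same set with one comprehension per level (objective: simpler; same output set and order).

-- ===== PORT A =====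
-- A: answer = {()}; for _ in range(length): temp = set(); triple nested add; answer = temp.
def gen_all_sequences (outcomes : List Int) (length : Int) : List (List Int) :=
  (PySem.List.pyRange 0 length 1).foldl
    (fun answer _ =>
      answer.foldl
        (fun temp seq =>
          outcomes.foldl (fun temp item => PySem.Set.add temp (seq ++ [item])) temp)
        PySem.Set.empty)
    (PySem.Set.ofList [[]])

-- ===== PORT B =====
-- B's recursion on `length`, encoded with the non-negative part of length as fuel.
def genAllSeqRec (outcomes : List Int) : Nat → List (List Int)
  | 0 => [[]]
  | n + 1 =>
      PySem.Set.ofList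
        ((genAllSeqRec outcomes n).flatMap
          (fun seq => outcomes.map (fun item => seq ++ [item])))

def gen_all_sequences_alt (outcomes : List Int) (length : Int) : List (List Int) :=
  if length ≤ 0 then [[]] else genAllSeqRec outcomes length.toNat

-- ===== PRECONDITION & SPEC =====
def Spec_gen_all_sequences (outcomes : List Int) (length : Int) (out : List (List Int)) : Prop := out = gen_all_sequences_alt outcomes length
instance (outcomes : List Int) (length : Int) (out : List (List Int)) : Decidable (Spec_gen_all_sequences outcomes length out) := by unfold Spec_gen_all_sequences; infer_instance

-- ===== CLAIM (what is proved, stated in full; the proofs are below) =====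
def Claim_equal_gen_all_sequences : Prop := ∀ (outcomes : List Int) (length : Int), Dom_gen_all_sequences outcomes length → Spec_gen_all_sequences outcomes length (gen_all_sequences outcomes length)

-- ===== LEMMAS AND PROOFS =====

-- foldl over a flatMap = nested foldl (used below, specialised to Set.add).
theorem pv_foldl_flatMap {α β : Type} (f : β → List α) (g : List α → α → List α) :
    ∀ (l : List β) (init : List α),
      ((l.flatMap f).foldl g init) = l.foldl (fun a x => (f x).foldl g a) init
  | [], _ => rfl
  | x :: l, init => by
      simp only [List.flatMap_cons, List.foldl_append, List.foldl_cons]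
      exact pv_foldl_flatMap f g l _

-- One loop iteration of A equals one recursion level of B.
theorem pv_step_eq (outcomes : List Int) (answer : List (List Int)) :
    answer.foldl
      (fun temp seq =>
        outcomes.foldl (fun temp item => PySem.Set.add temp (seq ++ [item])) temp)
      PySem.Set.empty
    = PySem.Set.ofList
        (answer.flatMap (fun seq => outcomes.map (fun item => seq ++ [item]))) := by
  rw [PySem.Set.ofList_eq_foldl, pv_foldl_flatMap]
  simp only [List.foldl_map]
  rfl

theorem pv_loop_eq (outcomes : List Int) (n : Nat) :
    (PySem.List.pyRange 0 (n : Int) 1).foldl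
      (fun answer _ =>
        answer.foldl
          (fun temp seq =>
            outcomes.foldl (fun temp item => PySem.Set.add temp (seq ++ [item])) temp)
          PySem.Set.empty)
      (PySem.Set.ofList [[]])
    = genAllSeqRec outcomes n := by
  induction n with
  | zero => rfl
  | succ m ih =>
      have h : ((m + 1 : Nat) : Int) = (m : Int) + 1 := by push_cast; ring
      rw [h, PySem.List.pyRange_one_succ_right (by positivity), List.foldl_append, ih]
      simp only [List.foldl_cons, List.foldl_nil, genAllSeqRec]
      exact pv_step_eq outcomes _

-- ===== VERDICT (by name: the statement is the Claim_ definition above) =====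
theorem gen_all_sequences_spec : Claim_equal_gen_all_sequences := by
  intro outcomes length _
  unfold Spec_gen_all_sequences gen_all_sequences gen_all_sequences_alt
  by_cases h : length ≤ 0
  · rw [if_pos h, PySem.List.pyRange_one_eq_nil h]
    rfl
  · rw [if_neg h]
    have h0 : length = ((length.toNat : Nat) : Int) := (Int.toNat_of_nonneg (by omega)).symm
    rw [h0]
    exact pv_loop_eq outcomes length.toNat
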